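-- pv_equiv track=rewrite | github.com/technobok/strata | src/strata/services/template_service.py | _strip_literals
-- ===== SOURCE A (Python) =====
-- def _strip_literals(sql: str) -> str:
--     """Replace string literals, quoted identifiers, and comments with spaces.
--
--     Used so the bind-param regex doesn't match `$name` patterns that appear
--     inside `'...'` strings, `"..."` identifiers, or `-- ...` / `/* ... */`
--     comments. Length is preserved so source positions still line up if a
--     caller cares.
--     """
--     out: list[str] = []
--     i = 0
--     n = len(sql)
--     while i < n:
--         c = sql[i]
--         if c == "'" or c == '"':
--             quote = c
--             j = i + 1
--             while j < n:
--                 if sql[j] == quote: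
--                     if j + 1 < n and sql[j + 1] == quote:
--                         # SQL-style doubled-quote escape
--                         j += 2
--                         continue
--                     j += 1
--                     break
--                 j += 1
--             out.append(" " * (j - i))
--             i = j
--         elif c == "-" and i + 1 < n and sql[i + 1] == "-":
--             j = sql.find("\n", i)
--             if j == -1:
--                 j = n
--             out.append(" " * (j - i))
--             i = j
--         elif c == "/" and i + 1 < n and sql[i + 1] == "*":
--             j = sql.find("*/", i + 2)
--             j = n if j == -1 else j + 2
--             out.append(" " * (j - i))
--             i = j
--         else:
--             out.append(c)
--             i += 1
--     return "".join(out)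
-- ===== SOURCE B (Python) =====
-- def _strip_literals(sql: str) -> str:
--     """One-pass finite-state scanner: same blanking as the index/find version,
--     but as a character-at-a-time state machine with no inner scans."""
--     NORM, INSTR, QEND, DASH, SLASH, LINE, BLOCK, STAR = range(8)
--     out = []
--     state = NORM
--     quote = ""
--
--     def norm_step(c):
--         # returns (new_state, emitted) for a char seen in normal context
--         nonlocal quote
--         if c == "'" or c == '"':
--             quote = c
--             return INSTR, " "
--         if c == "-":
--             return DASH, ""
--         if c == "/":
--             return SLASH, ""
--         return NORM, c
--
--     for c in sql:
--         if state == NORM: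
--             state, emit = norm_step(c)
--         elif state == INSTR:
--             state, emit = (QEND, " ") if c == quote else (INSTR, " ")
--         elif state == QEND:
--             if c == quote:
--                 state, emit = INSTR, " "
--             else:
--                 state, emit = norm_step(c)
--         elif state == DASH:
--             if c == "-":
--                 state, emit = LINE, "  "
--             else:
--                 state, emit = norm_step(c)
--                 emit = "-" + emit
--         elif state == SLASH:
--             if c == "*":
--                 state, emit = BLOCK, "  "
--             else:
--                 state, emit = norm_step(c)
--                 emit = "/" + emit
--         elif state == LINE:
--             state, emit = (NORM, "\n") if c == "\n" else (LINE, " ")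
--         elif state == BLOCK:
--             state, emit = (STAR, " ") if c == "*" else (BLOCK, " ")
--         else:  # STAR
--             if c == "/":
--                 state, emit = NORM, " "
--             elif c == "*":
--                 state, emit = STAR, " "
--             else:
--                 state, emit = BLOCK, " "
--         out.append(emit)
--     if state == DASH:
--         out.append("-")
--     elif state == SLASH:
--         out.append("/")
--     return "".join(out)
-- ===== Notes on version B (the rewrite author's own statement) =====
-- stated objective: alternative
-- what changed: Replaced the index-based scanner with inner while/str.find scans for each literal/comment by a single-pass character-at-a-time finite-state machine (8 states) that emits output per character with no inner loops or substring searches.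
import Mathlib
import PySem

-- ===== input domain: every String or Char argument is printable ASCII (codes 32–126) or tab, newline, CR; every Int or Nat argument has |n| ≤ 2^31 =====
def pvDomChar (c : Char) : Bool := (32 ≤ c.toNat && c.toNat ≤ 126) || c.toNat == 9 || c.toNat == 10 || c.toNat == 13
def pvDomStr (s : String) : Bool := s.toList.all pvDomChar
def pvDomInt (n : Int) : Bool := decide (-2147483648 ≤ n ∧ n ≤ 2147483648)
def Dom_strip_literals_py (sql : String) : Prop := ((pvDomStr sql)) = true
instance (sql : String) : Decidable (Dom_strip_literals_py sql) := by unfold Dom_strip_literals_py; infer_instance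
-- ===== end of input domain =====

-- B replaces A's index-based scanner with inner find/while scans by a one-pass
-- character-at-a-time finite-state machine (objective: alternative decomposition, same O(n) cost).

-- ===== PORT A =====
-- inner `while j < n` loop of the quote branch: returns (j - (i+1), suffix at j)
def aScanQuote (q : Char) : List Char → Nat × List Char
  | [] => (0, [])
  | c :: rest =>
    if c = q then
      match rest with
      | c2 :: rest2 =>
        if c2 = q then ((aScanQuote q rest2).1 + 2, (aScanQuote q rest2).2)
        else (1, rest)
      | [] => (1, [])
    else ((aScanQuote q rest).1 + 1, (aScanQuote q rest).2)

-- `sql.find("\n", i)` of the `--` branch: chars consumed before '\n' (or all)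
def aScanLine : List Char → Nat × List Char
  | [] => (0, [])
  | c :: rest =>
    if c = '\n' then (0, c :: rest)
    else ((aScanLine rest).1 + 1, (aScanLine rest).2)

-- `sql.find("*/", i + 2)` of the `/*` branch: none = not found
def aScanBlock : List Char → Option (Nat × List Char)
  | [] => none
  | [_] => none
  | c :: c2 :: rest2 =>
    if c = '*' ∧ c2 = '/' then some (2, rest2)
    else (aScanBlock (c2 :: rest2)).map (fun p => (p.1 + 1, p.2))

theorem aScanQuote_len (q : Char) (l : List Char) :
    (aScanQuote q l).1 + (aScanQuote q l).2.length = l.length := by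
  fun_induction aScanQuote q l <;> simp [*] <;> omega

theorem aScanLine_len (l : List Char) :
    (aScanLine l).1 + (aScanLine l).2.length = l.length := by
  fun_induction aScanLine l <;> simp [*] <;> omega

theorem aScanBlock_len (l : List Char) (k : Nat) (r : List Char)
    (h : aScanBlock l = some (k, r)) : k + r.length = l.length := by
  fun_induction aScanBlock l generalizing k r with
  | case1 => simp [aScanBlock] at h
  | case2 c => simp [aScanBlock] at h
  | case3 c c2 rest2 hc =>
      simp [aScanBlock, hc] at h
      rcases h with ⟨rfl, rfl⟩
      simp only [List.length_cons]
      omega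
  | case4 c c2 rest2 hc ih =>
      simp [aScanBlock, hc, Option.map_eq_some_iff] at h
      obtain ⟨a, hab, rfl⟩ := h
      have := ih a r hab
      simp at this ⊢
      omega

-- the `while i < n` main loop of A
def aMain : List Char → List Char
  | [] => []
  | c :: rest =>
    if c = '\'' ∨ c = '"' then
      List.replicate ((aScanQuote c rest).1 + 1) ' ' ++ aMain (aScanQuote c rest).2
    else if c = '-' ∧ rest.head? = some '-' then
      List.replicate ((aScanLine rest).1 + 1) ' ' ++ aMain (aScanLine rest).2
    else if c = '/' ∧ rest.head? = some '*' then
      match h : aScanBlock rest.tail with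
      | some p => List.replicate (p.1 + 2) ' ' ++ aMain p.2
      | none => List.replicate (rest.tail.length + 2) ' '
    else c :: aMain rest
  termination_by l => l.length
  decreasing_by
    · have := aScanQuote_len c rest; simp; omega
    · have := aScanLine_len rest; simp; omega
    · have := aScanBlock_len rest.tail p.1 p.2 (by simpa using h)
      rcases rest with _ | ⟨r0, rest'⟩ <;> simp_all <;> omega
    · simp

def strip_literals_py (sql : String) : String := String.mk (aMain sql.toList)

-- ===== PORT B =====
inductive BSt where
  | norm | instr (q : Char) | qend (q : Char) | dash | slash | line | block | star
  deriving DecidableEq, Repr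

def bNormStep (c : Char) : BSt × List Char :=
  if c = '\'' ∨ c = '"' then (BSt.instr c, [' '])
  else if c = '-' then (BSt.dash, [])
  else if c = '/' then (BSt.slash, [])
  else (BSt.norm, [c])

def bStep : BSt → Char → BSt × List Char
  | BSt.norm, c => bNormStep c
  | BSt.instr q, c => if c = q then (BSt.qend q, [' ']) else (BSt.instr q, [' '])
  | BSt.qend q, c => if c = q then (BSt.instr q, [' ']) else bNormStep c
  | BSt.dash, c =>
      if c = '-' then (BSt.line, [' ', ' '])
      else let p := bNormStep c; (p.1, '-' :: p.2)
  | BSt.slash, c =>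
      if c = '*' then (BSt.block, [' ', ' '])
      else let p := bNormStep c; (p.1, '/' :: p.2)
  | BSt.line, c => if c = '\n' then (BSt.norm, ['\n']) else (BSt.line, [' '])
  | BSt.block, c => if c = '*' then (BSt.star, [' ']) else (BSt.block, [' '])
  | BSt.star, c =>
      if c = '/' then (BSt.norm, [' '])
      else if c = '*' then (BSt.star, [' '])
      else (BSt.block, [' '])

def bFinish : BSt → List Char
  | BSt.dash => ['-']
  | BSt.slash => ['/']
  | _ => []

def bRun (s : BSt) : List Char → List Char
  | [] => bFinish s
  | c :: rest => (bStep s c).2 ++ bRun (bStep s c).1 rest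

def strip_literals_py_alt (sql : String) : String := String.mk (bRun BSt.norm sql.toList)

-- ===== PRECONDITION & SPEC =====
def Spec_strip_literals_py (sql : String) (out : String) : Prop := out = strip_literals_py_alt sql
instance (sql : String) (out : String) : Decidable (Spec_strip_literals_py sql out) := by unfold Spec_strip_literals_py; infer_instance

-- ===== CLAIM (what is proved, stated in full; the proofs are below) =====
def Claim_equal_strip_literals_py : Prop := ∀ (sql : String), Dom_strip_literals_py sql → Spec_strip_literals_py sql (strip_literals_py sql)

-- ===== LEMMAS AND PROOFS =====

theorem bRun_quote (q : Char) (l : List Char) :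
    bRun (BSt.instr q) l =
      List.replicate (aScanQuote q l).1 ' ' ++ bRun BSt.norm (aScanQuote q l).2 := by
  fun_induction aScanQuote q l with
  | case1 => simp [aScanQuote, bRun, bFinish]
  | case2 rest2 ih =>
      simp [aScanQuote, bRun, bStep, ih, List.replicate_succ]
  | case3 c2 rest2 hc2 =>
      simp [aScanQuote, hc2, bRun, bStep, List.replicate_succ]
  | case4 =>
      simp [aScanQuote, bRun, bStep, bFinish, List.replicate_succ]
  | case5 c rest hc ih =>
      simp [aScanQuote, hc, bRun, bStep, ih, List.replicate_succ]

theorem bRun_line (l : List Char) :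
    bRun BSt.line l =
      List.replicate (aScanLine l).1 ' ' ++ bRun BSt.norm (aScanLine l).2 := by
  fun_induction aScanLine l with
  | case1 => simp [aScanLine, bRun, bFinish]
  | case2 rest =>
      simp [aScanLine, bRun, bStep, bNormStep]
  | case3 c rest hc ih =>
      simp [aScanLine, hc, bRun, bStep, ih, List.replicate_succ]

theorem bRun_star (l : List Char) (h : ∀ r, l ≠ '/' :: r) :
    bRun BSt.star l = bRun BSt.block l := by
  cases l with
  | nil => rfl
  | cons c rest =>
      have hc : c ≠ '/' := fun hcc => h rest (by rw [hcc])
      by_cases hs : c = '*' <;> simp [bRun, bStep, hc, hs]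

theorem bRun_block_some (l : List Char) (k : Nat) (r : List Char)
    (h : aScanBlock l = some (k, r)) :
    bRun BSt.block l = List.replicate k ' ' ++ bRun BSt.norm r := by
  fun_induction aScanBlock l generalizing k r with
  | case1 => simp [aScanBlock] at h
  | case2 c => simp [aScanBlock] at h
  | case3 c c2 rest2 hc =>
      simp [aScanBlock, hc] at h
      rcases h with ⟨rfl, rfl⟩
      simp [bRun, bStep, hc.1, hc.2, List.replicate_succ]
  | case4 c c2 rest2 hc ih =>
      simp [aScanBlock, hc, Option.map_eq_some_iff] at h
      obtain ⟨a, hab, rfl⟩ := h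
      have step1 : bRun (if c = '*' then BSt.star else BSt.block) (c2 :: rest2)
          = bRun BSt.block (c2 :: rest2) := by
        by_cases hcs : c = '*'
        · subst hcs
          have hc2 : c2 ≠ '/' := fun hcc => hc ⟨rfl, hcc⟩
          simp [bRun_star (c2 :: rest2) (fun r hr => hc2 (by injection hr))]
        · simp [hcs]
      have hrec := ih a r hab
      by_cases hcs : c = '*' <;>
        simp_all [bRun, bStep, List.replicate_succ]

theorem bRun_block_none (l : List Char) (h : aScanBlock l = none) :
    bRun BSt.block l = List.replicate l.length ' ' := by
  fun_induction aScanBlock l with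
  | case1 => simp [bRun, bFinish]
  | case2 c =>
      by_cases hcs : c = '*' <;> simp [bRun, bStep, bFinish, hcs]
  | case3 c c2 rest2 hc => simp [aScanBlock, hc] at h
  | case4 c c2 rest2 hc ih =>
      simp [aScanBlock, hc] at h
      have step1 : bRun (if c = '*' then BSt.star else BSt.block) (c2 :: rest2)
          = bRun BSt.block (c2 :: rest2) := by
        by_cases hcs : c = '*'
        · subst hcs
          have hc2 : c2 ≠ '/' := fun hcc => hc ⟨rfl, hcc⟩
          simp [bRun_star (c2 :: rest2) (fun r hr => hc2 (by injection hr))]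
        · simp [hcs]
      have hrec := ih h
      by_cases hcs : c = '*' <;>
        simp_all [bRun, bStep, List.replicate_succ]

theorem bRun_dash (l : List Char) (h : ∀ r, l ≠ '-' :: r) :
    bRun BSt.dash l = '-' :: bRun BSt.norm l := by
  cases l with
  | nil => rfl
  | cons c rest =>
      have hc : c ≠ '-' := fun hcc => h rest (by rw [hcc])
      simp [bRun, bStep, hc]

theorem bRun_slash (l : List Char) (h : ∀ r, l ≠ '*' :: r) :
    bRun BSt.slash l = '/' :: bRun BSt.norm l := by
  cases l with
  | nil => rfl
  | cons c rest =>
      have hc : c ≠ '*' := fun hcc => h rest (by rw [hcc])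
      simp [bRun, bStep, hc]

theorem aMain_eq_bRun (l : List Char) : aMain l = bRun BSt.norm l := by
  fun_induction aMain l with
  | case1 => rfl
  | case2 c rest hq ih =>
      simp [aMain, bRun, bStep, bNormStep, hq, bRun_quote, ih, List.replicate_succ]
  | case3 c rest hq hd ih =>
      rcases hd with ⟨rfl, hh⟩
      rcases rest with _ | ⟨r0, rest2⟩
      · simp at hh
      · simp at hh
        subst hh
        simp [aScanLine, bRun, bStep, bNormStep, bRun_line, List.replicate_succ] at ih ⊢
        simp [ih]
  | case4 c rest hq hd hs p hblk ih =>
      rcases hs with ⟨rfl, hh⟩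
      rcases rest with _ | ⟨r0, rest2⟩
      · simp at hh
      · simp at hh
        subst hh
        simp only [List.tail_cons] at hblk
        have hb := bRun_block_some rest2 p.1 p.2 (by simpa using hblk)
        simp [bRun, bStep, bNormStep, hb, ih, List.replicate_succ]
  | case5 c rest hq hd hs hblk =>
      rcases hs with ⟨rfl, hh⟩
      rcases rest with _ | ⟨r0, rest2⟩
      · simp at hh
      · simp at hh
        subst hh
        simp only [List.tail_cons] at hblk
        have hb := bRun_block_none rest2 hblk
        simp [bRun, bStep, bNormStep, hb, List.replicate_succ]
  | case6 c rest hq hd hs ih =>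
      by_cases hc1 : c = '-'
      · subst hc1
        have hr : ∀ r, rest ≠ '-' :: r := by
          intro r hr'
          exact hd ⟨rfl, by rw [hr']; rfl⟩
        simp [bRun, bStep, bNormStep, hq, bRun_dash rest hr, ih]
      · by_cases hc2 : c = '/'
        · subst hc2
          have hr : ∀ r, rest ≠ '*' :: r := by
            intro r hr'
            exact hs ⟨rfl, by rw [hr']; rfl⟩
          simp [bRun, bStep, bNormStep, hq, bRun_slash rest hr, ih]
        · simp [bRun, bStep, bNormStep, hq, hc1, hc2, ih]

-- ===== VERDICT (by name: the statement is the Claim_ definition above) =====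
theorem strip_literals_py_spec : Claim_equal_strip_literals_py := by
  intro sql _
  unfold Spec_strip_literals_py strip_literals_py strip_literals_py_alt
  rw [aMain_eq_bRun]
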